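-- pv_equiv track=rewrite | github.com/Luoimo/Kant | backend/graph/graph_extractor.py | _build_character_alias_map
-- ===== SOURCE A (Python) =====
-- from typing import Any
--
-- def _build_character_alias_map(raw_characters: list[Any], canonical_characters: list[str]) -> dict[str, str]:
--     alias_map: dict[str, str] = {}
--     for raw in raw_characters:
--         raw_s = str(raw or "").strip()
--         for canon in canonical_characters:
--             if raw_s and raw_s != canon and canon.startswith(raw_s):
--                 alias_map[raw_s] = canon
--                 break
--     return alias_map
-- ===== SOURCE B (Python) =====
-- def _build_character_alias_map(raw_characters, canonical_characters):
--     # Precompute: proper prefix -> earliest canonical name having that prefix.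
--     prefix_to_canon = {}
--     for canon in canonical_characters:
--         for i in range(1, len(canon)):
--             prefix_to_canon.setdefault(canon[:i], canon)
--     alias_map = {}
--     for raw in raw_characters:
--         raw_s = str(raw or "").strip()
--         canon = prefix_to_canon.get(raw_s)
--         if canon is not None:
--             alias_map[raw_s] = canon
--     return alias_map
-- ===== Notes on version B (the rewrite author's own statement) =====
-- stated objective: faster
-- what changed: Instead of scanning all canonical names per raw name, B precomputes a dict mapping each proper prefix of a canonical name to the earliest canonical name with that prefix (setdefault keeps the first), so each raw name is resolved by one hash lookup.
import Mathlib
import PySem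

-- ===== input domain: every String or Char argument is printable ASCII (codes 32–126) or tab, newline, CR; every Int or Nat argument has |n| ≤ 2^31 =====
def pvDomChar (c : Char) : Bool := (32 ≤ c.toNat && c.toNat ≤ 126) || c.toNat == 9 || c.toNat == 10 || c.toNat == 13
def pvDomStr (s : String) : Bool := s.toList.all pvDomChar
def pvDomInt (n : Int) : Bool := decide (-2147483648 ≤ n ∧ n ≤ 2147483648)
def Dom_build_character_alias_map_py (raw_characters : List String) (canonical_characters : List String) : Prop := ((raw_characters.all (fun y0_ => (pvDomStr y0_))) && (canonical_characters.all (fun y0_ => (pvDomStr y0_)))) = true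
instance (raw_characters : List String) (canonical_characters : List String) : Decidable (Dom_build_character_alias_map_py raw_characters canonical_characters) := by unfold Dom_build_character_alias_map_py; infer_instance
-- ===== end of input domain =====

-- B replaces A's per-raw scan over all canonical names by a precomputed
-- prefix→earliest-canonical dictionary and a single lookup per raw name (faster in a timing run).


-- ===== PORT A =====
-- inner 'for canon in canonical_characters: … break' loop of A
def pvAInner (raw_s : String) (d : PySem.Dict String String) : List String → PySem.Dict String String
  | [] => d
  | canon :: rest =>
    if raw_s ≠ "" ∧ raw_s ≠ canon ∧ PySem.Str.startswith canon raw_s = true then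
      d.insert raw_s canon
    else pvAInner raw_s d rest

-- on a String argument, Python's str(raw or "") is raw itself, so raw_s = raw.strip()
def build_character_alias_map_py (raw_characters : List String) (canonical_characters : List String) : List (String × String) :=
  (raw_characters.foldl
    (fun d raw => pvAInner (PySem.Str.strip raw) d canonical_characters)
    PySem.Dict.empty).items

-- ===== PORT B =====
-- proper prefix → earliest canonical name with that prefix (setdefault keeps the first)
def pvPrefixDict (canonical_characters : List String) : PySem.Dict String String :=
  canonical_characters.foldl
    (fun d canon =>
      (PySem.List.pyRange 1 (PySem.Str.len canon) 1).foldl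
        (fun d i => d.setdefault (PySem.Str.slice canon none (some i)) canon) d)
    PySem.Dict.empty

def build_character_alias_map_py_alt (raw_characters : List String) (canonical_characters : List String) : List (String × String) :=
  let pd := pvPrefixDict canonical_characters
  (raw_characters.foldl
    (fun d raw =>
      let raw_s := PySem.Str.strip raw
      match pd.get? raw_s with
      | some canon => d.insert raw_s canon
      | none => d)
    PySem.Dict.empty).items

-- ===== PRECONDITION & SPEC =====
def Spec_build_character_alias_map_py (raw_characters : List String) (canonical_characters : List String) (out : List (String × String)) : Prop := out = build_character_alias_map_py_alt raw_characters canonical_characters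
instance (raw_characters : List String) (canonical_characters : List String) (out : List (String × String)) : Decidable (Spec_build_character_alias_map_py raw_characters canonical_characters out) := by unfold Spec_build_character_alias_map_py; infer_instance

-- ===== CLAIM (what is proved, stated in full; the proofs are below) =====
def Claim_equal_build_character_alias_map_py : Prop := ∀ (raw_characters : List String) (canonical_characters : List String), Dom_build_character_alias_map_py raw_characters canonical_characters → Spec_build_character_alias_map_py raw_characters canonical_characters (build_character_alias_map_py raw_characters canonical_characters)

-- ===== LEMMAS AND PROOFS =====

-- first canonical name of which s is a nonempty proper prefix (a proof-side characterisation)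
def pvFindMatch (s : String) : List String → Option String
  | [] => none
  | c :: rest =>
    if s ≠ "" ∧ s ≠ c ∧ PySem.Str.startswith c s = true then some c else pvFindMatch s rest

theorem pvAInner_eq (s : String) (d : PySem.Dict String String) (cs : List String) :
    pvAInner s d cs = match pvFindMatch s cs with
      | some c => d.insert s c
      | none => d := by
  induction cs with
  | nil => rfl
  | cons c rest ih =>
    by_cases h : s ≠ "" ∧ s ≠ c ∧ PySem.Str.startswith c s = true
    · simp only [pvAInner, pvFindMatch, if_pos h]
    · simp only [pvAInner, pvFindMatch, if_neg h, ih]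

theorem pvSetdefault_fold_get? (f : Int → String) (ks : List Int) (c : String) (s : String) :
    ∀ d : PySem.Dict String String,
      (ks.foldl (fun d i => d.setdefault (f i) c) d).get? s
        = (d.get? s).or (if s ∈ ks.map f then some c else none) := by
  induction ks with
  | nil => intro d; cases h : d.get? s <;> simp [h]
  | cons k rest ih =>
    intro d
    rw [List.foldl_cons, ih]
    by_cases hk : s = f k
    · subst hk
      rw [PySem.Dict.get?_setdefault_self]
      cases d.get? (f k) <;> simp [Option.or]
    · rw [PySem.Dict.get?_setdefault_of_ne _ _ hk]
      by_cases hm : s ∈ rest.map f <;> simp [hm, hk]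

theorem pvSlice_take (c : String) (i : Int) (h0 : 0 ≤ i) :
    (PySem.Str.slice c none (some i)).toList = c.toList.take i.toNat := by
  rw [PySem.Str.toList_slice, PySem.Chars.slice_eq_listSlice, PySem.List.slice_to _ h0]

theorem pvMem_prefixes_iff (c s : String) :
    (s ∈ (PySem.List.pyRange 1 (PySem.Str.len c) 1).map
        (fun i => PySem.Str.slice c none (some i)))
      ↔ (s ≠ "" ∧ s ≠ c ∧ PySem.Str.startswith c s = true) := by
  have hlen : PySem.Str.len c = (c.toList.length : Int) := by
    simp [PySem.Str.len_eq]
  have hsw : (PySem.Str.startswith c s = true) ↔ s.toList <+: c.toList := by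
    rw [PySem.Str.startswith_eq, PySem.Chars.startswith_iff]
  have hinj : ∀ a b : String, a.toList = b.toList → a = b := by
    intro a b h; exact String.ext_iff.mpr h
  simp only [List.mem_map, PySem.List.mem_pyRange_one, hlen, hsw]
  constructor
  · rintro ⟨i, ⟨h1, h2⟩, rfl⟩
    have h0 : (0:Int) ≤ i := by omega
    have ht : (PySem.Str.slice c none (some i)).toList = c.toList.take i.toNat :=
      pvSlice_take c i h0
    have hi : i.toNat < c.toList.length := by omega
    have hlt : (c.toList.take i.toNat).length = i.toNat := by
      rw [List.length_take]; omega
    refine ⟨?_, ?_, ?_⟩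
    · intro he
      have : (PySem.Str.slice c none (some i)).toList = [] := by rw [he]; rfl
      rw [ht] at this
      have := congrArg List.length this
      rw [hlt] at this
      simp at this; omega
    · intro he
      have : (PySem.Str.slice c none (some i)).toList = c.toList := by rw [he]
      rw [ht] at this
      have := congrArg List.length this
      rw [hlt] at this
      omega
    · rw [ht]; exact List.take_prefix _ _
  · rintro ⟨h1, h2, h3⟩
    refine ⟨(s.toList.length : Int), ⟨?_, ?_⟩, ?_⟩
    · have hne : s.toList ≠ [] := by
        intro he; exact h1 (hinj _ _ (by rw [he]; rfl))
      have : 0 < s.toList.length := List.length_pos_iff.mpr hne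
      omega
    · have hle : s.toList.length ≤ c.toList.length := h3.length_le
      have hne : s.toList.length ≠ c.toList.length := by
        intro he; exact h2 (hinj _ _ (h3.eq_of_length he))
      omega
    · apply (hinj _ _ _).symm
      rw [pvSlice_take c _ (by positivity)]
      simpa using List.prefix_iff_eq_take.mp h3

theorem pvPrefixDict_canon_get? (c s : String) (d : PySem.Dict String String) :
    ((PySem.List.pyRange 1 (PySem.Str.len c) 1).foldl
        (fun d i => d.setdefault (PySem.Str.slice c none (some i)) c) d).get? s
      = (d.get? s).or (if s ≠ "" ∧ s ≠ c ∧ PySem.Str.startswith c s = true then some c else none) := by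
  rw [pvSetdefault_fold_get? (fun i => PySem.Str.slice c none (some i))]
  congr 1
  by_cases h : s ≠ "" ∧ s ≠ c ∧ PySem.Str.startswith c s = true
  · rw [if_pos ((pvMem_prefixes_iff c s).mpr h), if_pos h]
  · rw [if_neg (fun hm => h ((pvMem_prefixes_iff c s).mp hm)), if_neg h]

theorem pvPrefixDict_get?_aux (cs : List String) (s : String) :
    ∀ d : PySem.Dict String String,
      (cs.foldl (fun d canon =>
          (PySem.List.pyRange 1 (PySem.Str.len canon) 1).foldl
            (fun d i => d.setdefault (PySem.Str.slice canon none (some i)) canon) d) d).get? s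
        = (d.get? s).or (pvFindMatch s cs) := by
  induction cs with
  | nil => intro d; cases h : d.get? s <;> simp [pvFindMatch, h]
  | cons c rest ih =>
    intro d
    rw [List.foldl_cons, ih, pvPrefixDict_canon_get?]
    by_cases h : s ≠ "" ∧ s ≠ c ∧ PySem.Str.startswith c s = true
    · simp only [pvFindMatch, if_pos h]
      cases hd : d.get? s <;> simp [Option.or]
    · simp only [pvFindMatch, if_neg h]
      cases hd : d.get? s <;> simp [Option.or]

theorem pvPrefixDict_get? (cs : List String) (s : String) :
    (pvPrefixDict cs).get? s = pvFindMatch s cs := by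
  rw [pvPrefixDict, pvPrefixDict_get?_aux]
  simp [PySem.Dict.empty, PySem.Dict.get?]

-- ===== VERDICT (by name: the statement is the Claim_ definition above) =====
theorem build_character_alias_map_py_spec : Claim_equal_build_character_alias_map_py := by
  intro raws cs _
  unfold Spec_build_character_alias_map_py build_character_alias_map_py build_character_alias_map_py_alt
  have hf : (fun (d : PySem.Dict String String) raw => pvAInner (PySem.Str.strip raw) d cs)
      = (fun (d : PySem.Dict String String) raw =>
          match (pvPrefixDict cs).get? (PySem.Str.strip raw) with
          | some canon => d.insert (PySem.Str.strip raw) canon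
          | none => d) := by
    funext d raw
    rw [pvAInner_eq, pvPrefixDict_get?]
  rw [hf]
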